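-- pv_equiv track=rewrite | github.com/JeongGod/Algo-study | JaeYoung/week04/43163.py | solution
-- ===== SOURCE A (Python) =====
-- from typing import List
--
-- def word_diff(a: str, b: str) -> int:
--     diff: int = 0
--     for x, y in zip(a, b):
--         if x != y:
--             diff += 1
--     return diff
--
-- def solution(begin: str, target: str, words: List[str]) -> int:
--     answer: List[int] = []
--
--     if target not in words:
--         return 0
--
--     for idx, word in enumerate(words):
--         if word_diff(begin, word) <= 1:
--             length: int = 0
--             for next in words[idx:]:
--                 length += 1
--                 diff: int = word_diff(target, next)
--
--                 if diff == 0: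
--                     break
--
--                 if diff == 1:
--                     length += 1
--                     break
--
--             answer.append(length)
--
--     return min(answer)
-- ===== SOURCE B (Python) =====
-- from typing import List
--
--
-- def word_diff(a: str, b: str) -> int:
--     diff = 0
--     for x, y in zip(a, b):
--         if x != y:
--             diff += 1
--     return diff
--
--
-- def solution(begin: str, target: str, words: List[str]) -> int:
--     if target not in words:
--         return 0
--     # One backward pass: carry the offset to the nearest position j >= i with
--     # word_diff(target, words[j]) <= 1 (and whether that diff is exactly 1),
--     # instead of rescanning words[idx:] forward for each qualifying start.
--     n = len(words)
--     off = None        # nearest j - i, or None if no such j in the suffix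
--     bonus = 0         # 1 if word_diff(target, words[j]) == 1 at that j, else 0
--     best = None
--     for i in range(n - 1, -1, -1):
--         w = words[i]
--         dt = word_diff(target, w)
--         if dt <= 1:
--             off = 0
--             bonus = 1 if dt == 1 else 0
--         elif off is not None:
--             off += 1
--         if word_diff(begin, w) <= 1:
--             length = (off + 1 + bonus) if off is not None else n - i
--             if best is None or length < best:
--                 best = length
--     return best
-- ===== Notes on version B (the rewrite author's own statement) =====
-- stated objective: alternative
-- what changed: A rescans words[idx:] forward with the nested inner loop for every qualifying start; B makes a single backward pass that carries the offset to the nearest position j>=i with word_diff(target, words[j])<=1 (and whether that diff is exactly 1) and takes the running minimum, removing the inner forward scan.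
import Mathlib
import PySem

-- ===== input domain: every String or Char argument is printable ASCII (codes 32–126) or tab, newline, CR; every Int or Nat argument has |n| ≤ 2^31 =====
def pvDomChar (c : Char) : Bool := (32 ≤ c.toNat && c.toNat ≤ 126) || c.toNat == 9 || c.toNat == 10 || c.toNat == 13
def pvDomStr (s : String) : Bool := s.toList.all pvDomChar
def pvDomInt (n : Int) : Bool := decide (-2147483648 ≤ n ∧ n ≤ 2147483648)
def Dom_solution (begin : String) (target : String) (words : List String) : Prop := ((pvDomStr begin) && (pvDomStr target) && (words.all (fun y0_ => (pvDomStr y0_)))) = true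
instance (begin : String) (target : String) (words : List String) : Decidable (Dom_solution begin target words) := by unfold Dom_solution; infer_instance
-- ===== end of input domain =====

-- B replaces A's per-start forward rescans by one backward pass carrying the offset to the
-- nearest position with word_diff(target, ·) ≤ 1 and a running minimum (objective: alternative).

-- ===== PORT A =====

-- word_diff: count positions where the zipped characters differ
def wordDiff (a b : List Char) : Int :=
  (a.zip b).foldl (fun d p => if p.1 ≠ p.2 then d + 1 else d) 0

-- A's inner loop over words[idx:], with the running `length` accumulator and the two breaks
def innerA (target : List Char) : List String → Int → Int
  | [], acc => acc
  | w :: ws, acc =>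
    let acc' := acc + 1
    let d := wordDiff target w.toList
    if d = 0 then acc'
    else if d = 1 then acc' + 1
    else innerA target ws acc'

def solution (begin : String) (target : String) (words : List String) : Int :=
  if !(words.contains target) then 0
  else
    -- `answer` built by the enumerate loop, then min(answer)
    match PySem.List.min?
        ((PySem.List.enumerate words).foldl
          (fun acc p =>
            if wordDiff begin.toList p.2.toList ≤ 1 then
              acc ++ [innerA target.toList (PySem.List.slice words (some p.1) none) 0]
            else acc) [])
        (fun x => x) with
    | some m => m
    | none => 0   -- Python raises ValueError on min([]); excluded by Pre_solution

-- ===== PORT B =====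

-- B's single backward pass: state (off, bonus, best) as in Source B; processing the list
-- head after the recursive call on the tail is exactly the i = n-1 .. 0 loop.
def altRec (begin target : List Char) : List String → (Option Int × Int × Option Int)
  | [] => (none, 0, none)
  | w :: ws =>
    let s := altRec begin target ws
    let off := s.1
    let bonus := s.2.1
    let best := s.2.2
    let dt := wordDiff target w.toList
    let ob : Option Int × Int :=
      if dt ≤ 1 then (some 0, if dt = 1 then 1 else 0)
      else (off.map (· + 1), bonus)
    let best' :=
      if wordDiff begin w.toList ≤ 1 then
        let len : Int :=
          match ob.1 with
          | some o => o + 1 + ob.2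
          | none => (ws.length : Int) + 1   -- n - i = length of the remaining suffix
        some (match best with
              | some bv => if len < bv then len else bv
              | none => len)
      else best
    (ob.1, ob.2, best')

def solution_alt (begin : String) (target : String) (words : List String) : Int :=
  if !(words.contains target) then 0
  else
    match (altRec begin.toList target.toList words).2.2 with
    | some b => b
    | none => 0   -- unreachable under Pre_solution (Source B returns None here)

-- ===== PRECONDITION & SPEC =====
-- Pre_ excludes exactly the inputs where Python A raises ValueError (min of an empty list):
-- target occurs in words but no word is within diff 1 of begin; Source B returns None (not an int) there too.
def Pre_solution (begin : String) (target : String) (words : List String) : Prop :=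
  words.contains target = false ∨ ∃ w ∈ words, wordDiff begin.toList w.toList ≤ 1
instance (begin : String) (target : String) (words : List String) : Decidable (Pre_solution begin target words) := by unfold Pre_solution; infer_instance

def pvWitness_solution : String × String × List String := ("hit", "cog", ["hot", "dot", "dog", "lot", "log", "cog"])

def Spec_solution (begin : String) (target : String) (words : List String) (out : Int) : Prop := out = solution_alt begin target words
instance (begin : String) (target : String) (words : List String) (out : Int) : Decidable (Spec_solution begin target words out) := by unfold Spec_solution; infer_instance

-- ===== CLAIM (what is proved, stated in full; the proofs are below) =====
def Claim_equal_solution : Prop := ∀ (begin : String) (target : String) (words : List String), Dom_solution begin target words → Pre_solution begin target words → Spec_solution begin target words (solution begin target words)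

-- ===== LEMMAS AND PROOFS =====

-- 0 ≤ word_diff (it counts mismatches)
theorem wordDiff_nonneg (a b : List Char) : 0 ≤ wordDiff a b := by
  unfold wordDiff
  have h : ∀ (l : List (Char × Char)) (acc : Int), acc ≤ l.foldl (fun d p => if p.1 ≠ p.2 then d + 1 else d) acc := by
    intro l
    induction l with
    | nil => intro acc; simp
    | cons p t ih =>
      intro acc
      simp only [List.foldl_cons]
      calc acc ≤ (if p.1 ≠ p.2 then acc + 1 else acc) := by split <;> omega
        _ ≤ _ := ih _
  exact h _ 0

-- A's inner loop: the accumulator is additive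
theorem innerA_acc (t : List Char) (l : List String) (acc : Int) :
    innerA t l acc = acc + innerA t l 0 := by
  induction l generalizing acc with
  | nil => simp [innerA]
  | cons w ws ih =>
    simp only [innerA]
    split
    · omega
    · split
      · omega
      · rw [ih (acc + 1), ih (0 + 1)]; omega

-- A's inner scan from position i equals B's (off, bonus) state for that suffix
theorem inner_char (b t : List Char) (l : List String) :
    innerA t l 0 =
      (match (altRec b t l).1 with
       | some o => o + 1 + (altRec b t l).2.1
       | none => (l.length : Int)) := by
  induction l with
  | nil => simp [innerA, altRec]
  | cons w ws ih =>
    have hnn := wordDiff_nonneg t w.toList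
    simp only [innerA, altRec]
    by_cases h0 : wordDiff t w.toList = 0
    · simp [h0]
    · by_cases h1 : wordDiff t w.toList = 1
      · simp [h1]
      · have hle : ¬ wordDiff t w.toList ≤ 1 := by omega
        simp only [h0, h1, hle, if_false]
        rw [innerA_acc t ws (0 + 1), ih]
        cases hoff : (altRec b t ws).1 with
        | none => show (0:Int) + 1 + (ws.length:Int) = ((ws.length + 1 : Nat) : Int); push_cast; ring
        | some o => simp only [Option.map_some]; ring

-- The list A appends to, written as a structural recursion over words
def answersRec (b t : List Char) : List String → List Int
  | [] => []
  | w :: ws =>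
    (if wordDiff b w.toList ≤ 1 then [innerA t (w :: ws) 0] else []) ++ answersRec b t ws

-- A's enumerate/slice fold builds exactly answersRec
theorem foldA (b t : List Char) (ws : List String) :
    ∀ (pre : List String) (acc : List Int),
      (PySem.List.enumerate ws (pre.length : Int)).foldl
        (fun acc p =>
          if wordDiff b p.2.toList ≤ 1 then
            acc ++ [innerA t (PySem.List.slice (pre ++ ws) (some p.1) none) 0]
          else acc) acc
      = acc ++ answersRec b t ws := by
  induction ws with
  | nil => intro pre acc; simp [PySem.List.enumerate_nil, answersRec]
  | cons w rest ih =>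
    intro pre acc
    rw [PySem.List.enumerate_cons, List.foldl_cons]
    have hslice : PySem.List.slice (pre ++ w :: rest) (some (pre.length : Int)) none = w :: rest := by
      rw [PySem.List.slice_from_natCast]
      simp
    have hlen : ((pre.length : Int) + 1) = (((pre ++ [w]).length : Int)) := by
      simp
    have happ : pre ++ w :: rest = (pre ++ [w]) ++ rest := by simp
    rw [hslice]
    by_cases hc : wordDiff b w.toList ≤ 1
    · simp only [hc, if_pos, hlen, happ]
      rw [ih (pre ++ [w]) (acc ++ [innerA t (w :: rest) 0])]
      simp [answersRec, hc]
    · simp only [hc, if_neg, not_false_iff, hlen, happ]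
      rw [ih (pre ++ [w]) acc]
      simp [answersRec, hc]

-- min of a nonempty Int list, peeled one element at a time
theorem min?_cons_char (x : Int) (l : List Int) :
    PySem.List.min? (x :: l) (fun y => y) =
      some (match PySem.List.min? l (fun y => y) with
            | none => x
            | some m => min x m) := by
  have key : ∀ (t : List Int) (a b : Int), t.foldl min (min a b) = min a (t.foldl min b) := by
    intro t
    induction t with
    | nil => intro a b; rfl
    | cons z t' ih =>
      intro a b
      simp only [List.foldl_cons]
      rw [min_assoc, ih]
  cases l with
  | nil => rw [PySem.List.min?_id_cons]; simp [PySem.List.min?]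
  | cons y t =>
    rw [PySem.List.min?_id_cons, PySem.List.min?_id_cons]
    simp only [List.foldl_cons]
    rw [key]

-- the two ways of taking the running minimum agree
theorem combine (L : Int) (B : Option Int) :
    (match B with | none => L | some m => min L m)
      = (match B with | some bv => if L < bv then L else bv | none => L) := by
  cases B with
  | none => rfl
  | some bv =>
    show min L bv = if L < bv then L else bv
    rcases lt_or_ge L bv with h | h
    · rw [if_pos h, min_eq_left (le_of_lt h)]
    · rw [if_neg (not_lt.mpr h), min_eq_right h]

theorem best_char (b t : List Char) (ws : List String) :
    PySem.List.min? (answersRec b t ws) (fun y => y) = (altRec b t ws).2.2 := by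
  induction ws with
  | nil => simp [answersRec, altRec, PySem.List.min?]
  | cons w rest ih =>
    by_cases hc : wordDiff b w.toList ≤ 1
    · simp only [answersRec, hc, if_pos, List.singleton_append]
      rw [min?_cons_char, ih]
      have hnn := wordDiff_nonneg t w.toList
      by_cases h0 : wordDiff t w.toList = 0
      · have hdt : wordDiff t w.toList ≤ 1 := by omega
        have h1 : ¬ wordDiff t w.toList = 1 := by omega
        have hinner : innerA t (w :: rest) 0 = 1 := by simp [innerA, h0]
        simp only [altRec, hc, if_pos, hdt, h1, if_false, hinner]
        rw [combine]
        norm_num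
      · by_cases h1 : wordDiff t w.toList = 1
        · have hdt : wordDiff t w.toList ≤ 1 := by omega
          have hinner : innerA t (w :: rest) 0 = 2 := by simp [innerA, h1]
          simp only [altRec, hc, if_pos, h1, hinner]
          rw [combine]
          norm_num
        · have hdt : ¬ wordDiff t w.toList ≤ 1 := by omega
          have hinner : innerA t (w :: rest) 0 = 1 + innerA t rest 0 := by
            simp only [innerA, h0, h1, if_false]
            rw [innerA_acc t rest (0 + 1)]
            omega
          rw [inner_char b t rest] at hinner
          simp only [altRec, hc, if_pos, hdt, if_false, hinner]
          cases hoff : (altRec b t rest).1 with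
          | none =>
            simp only [Option.map_none]
            have : (1 : Int) + (rest.length : Int) = (rest.length : Int) + 1 := by ring
            rw [this, combine]
          | some o =>
            simp only [Option.map_some]
            have : (1 : Int) + (o + 1 + (altRec b t rest).2.1) = o + 1 + 1 + (altRec b t rest).2.1 := by ring
            rw [this, combine]
    · simp only [answersRec, hc, if_neg, not_false_iff, List.nil_append]
      rw [ih]
      simp only [altRec, hc, if_neg, not_false_iff]

-- ===== VERDICT (by name: the statement is the Claim_ definition above) =====
theorem solution_spec : Claim_equal_solution := by
  intro b t ws _ _
  show solution b t ws = solution_alt b t ws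
  unfold solution solution_alt
  by_cases hin : ws.contains t
  · have hm : t ∈ ws := by simpa using hin
    rw [if_neg (by simp [hm]), if_neg (by simp [hm])]
    have h := foldA b.toList t.toList ws [] []
    simp only [List.nil_append, List.length_nil, Nat.cast_zero] at h
    rw [h, best_char]
  · have hm : t ∉ ws := by simpa using hin
    rw [if_pos (by simp [hm]), if_pos (by simp [hm])]
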